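-- pv_equiv track=rewrite | github.com/BackofenLab/B1_03_align-linear-gap | helpers/matrix_helpers.py | nw_init_correct
-- ===== SOURCE A (Python) =====
-- def zero_init_correct(seq1, seq2):
--     return [[0] * (len(seq2)+1) for _ in range(len(seq1) + 1)]
--
-- def nw_init_correct(seq1, seq2, scoring):
--     match, mismatch, gap = scoring["match"], scoring["mismatch"], scoring["gap_introduction"]
--     matrix = zero_init_correct(seq1, seq2)
--     first_row = [i * mismatch for i in range(len(seq2) + 1)]
--     matrix[0] = first_row
--     for index, column in enumerate(matrix):
--         column[0] = index * mismatch
--     return matrix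
-- ===== SOURCE B (Python) =====
-- def nw_init_correct(seq1, seq2, scoring):
--     match, mismatch, gap = scoring["match"], scoring["mismatch"], scoring["gap_introduction"]
--     n, m = len(seq1), len(seq2)
--     cols = [[i * mismatch for i in range(n + 1)]]
--     for j in range(1, m + 1):
--         cols.append([j * mismatch] + [0] * n)
--     return [list(row) for row in zip(*cols)]
-- ===== Notes on version B (the rewrite author's own statement) =====
-- stated objective: alternative
-- what changed: B constructs the matrix column-major (gap column first, then each remaining column as [j*mismatch]+zeros) and transposes with zip(*cols), instead of A's allocate-a-zero-matrix-then-overwrite-first-row-and-first-column passes.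
import Mathlib
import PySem

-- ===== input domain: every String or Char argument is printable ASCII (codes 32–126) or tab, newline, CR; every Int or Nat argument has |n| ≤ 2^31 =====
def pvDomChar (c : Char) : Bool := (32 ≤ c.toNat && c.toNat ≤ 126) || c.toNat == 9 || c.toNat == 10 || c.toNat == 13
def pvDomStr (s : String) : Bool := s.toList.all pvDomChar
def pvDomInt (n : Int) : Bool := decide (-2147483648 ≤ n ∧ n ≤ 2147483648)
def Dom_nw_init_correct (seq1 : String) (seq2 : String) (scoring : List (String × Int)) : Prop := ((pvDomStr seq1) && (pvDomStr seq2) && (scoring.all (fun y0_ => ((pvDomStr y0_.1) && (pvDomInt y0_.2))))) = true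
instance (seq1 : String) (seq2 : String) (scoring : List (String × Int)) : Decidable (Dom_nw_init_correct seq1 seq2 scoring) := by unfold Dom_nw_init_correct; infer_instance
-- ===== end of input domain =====

-- B builds the matrix column-major (first the gap column, then each remaining column) and
-- transposes with zip(*cols), instead of A's allocate-zeros-then-patch-row-and-column passes
-- (objective: alternative construction, same cost).

-- ===== PORT A =====
def zero_init_correct (seq1 : String) (seq2 : String) : List (List Int) :=
  (PySem.List.pyRange 0 (PySem.Str.len seq1 + 1) 1).map
    (fun _ => PySem.List.pyRepeat [(0 : Int)] (PySem.Str.len seq2 + 1))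

def nw_init_correct (seq1 : String) (seq2 : String) (scoring : List (String × Int)) : List (List Int) :=
  -- scoring["match"] / scoring["gap_introduction"] are fetched but unused, as in A;
  -- a missing key (KeyError in Python) is excluded by Pre_, so getD's default is never the value used
  let _mtch := (PySem.Dict.get? ⟨scoring⟩ "match").getD (0 : Int)
  let mismatch := (PySem.Dict.get? ⟨scoring⟩ "mismatch").getD (0 : Int)
  let _gap := (PySem.Dict.get? ⟨scoring⟩ "gap_introduction").getD (0 : Int)
  let matrix := zero_init_correct seq1 seq2
  let first_row := (PySem.List.pyRange 0 (PySem.Str.len seq2 + 1) 1).map (fun i => i * mismatch)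
  let matrix := matrix.set 0 first_row
  (PySem.List.enumerate matrix).map (fun p => p.2.set 0 (p.1 * mismatch))

-- ===== PORT B =====
-- zip(*cols): take the heads of all lists while every list is nonempty (exact for equal-length
-- lists, which is the only way B calls it; Python's zip truncates at the shortest list likewise)
def pyZipStar {α : Type} [Inhabited α] (ls : List (List α)) : List (List α) :=
  if h : ls ≠ [] ∧ ls.all (fun l => !l.isEmpty) then
    (ls.map (fun l => l.headI)) :: pyZipStar (ls.map (fun l => l.tail))
  else []
termination_by ls.headI.length
decreasing_by
  obtain ⟨hne, hall⟩ := h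
  cases ls with
  | nil => exact absurd rfl hne
  | cons a t =>
    have ha := List.all_eq_true.mp hall a (by simp)
    cases a with
    | nil => simp at ha
    | cons x xs => simp

def nw_init_correct_alt (seq1 : String) (seq2 : String) (scoring : List (String × Int)) : List (List Int) :=
  let _mtch := (PySem.Dict.get? ⟨scoring⟩ "match").getD (0 : Int)
  let mismatch := (PySem.Dict.get? ⟨scoring⟩ "mismatch").getD (0 : Int)
  let _gap := (PySem.Dict.get? ⟨scoring⟩ "gap_introduction").getD (0 : Int)
  let n := PySem.Str.len seq1
  let m := PySem.Str.len seq2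
  let col0 := (PySem.List.pyRange 0 (n + 1) 1).map (fun i => i * mismatch)
  let cols := (PySem.List.pyRange 1 (m + 1) 1).foldl
    (fun acc j => acc ++ [[j * mismatch] ++ PySem.List.pyRepeat [(0 : Int)] n]) [col0]
  pyZipStar cols

-- ===== PRECONDITION & SPEC =====
-- Pre_: the three scoring keys must be present; both Pythons raise KeyError otherwise.
def Pre_nw_init_correct (seq1 : String) (seq2 : String) (scoring : List (String × Int)) : Prop :=
  (PySem.Dict.get? ⟨scoring⟩ "match").isSome = true ∧
  (PySem.Dict.get? ⟨scoring⟩ "mismatch").isSome = true ∧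
  (PySem.Dict.get? ⟨scoring⟩ "gap_introduction").isSome = true
instance (seq1 : String) (seq2 : String) (scoring : List (String × Int)) : Decidable (Pre_nw_init_correct seq1 seq2 scoring) := by unfold Pre_nw_init_correct; infer_instance

def pvWitness_nw_init_correct : String × String × (List (String × Int)) :=
  ("AC", "AGT", [("match", 1), ("mismatch", -1), ("gap_introduction", -2)])

def Spec_nw_init_correct (seq1 : String) (seq2 : String) (scoring : List (String × Int)) (out : List (List Int)) : Prop := out = nw_init_correct_alt seq1 seq2 scoring
instance (seq1 : String) (seq2 : String) (scoring : List (String × Int)) (out : List (List Int)) : Decidable (Spec_nw_init_correct seq1 seq2 scoring out) := by unfold Spec_nw_init_correct; infer_instance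

-- ===== CLAIM (what is proved, stated in full; the proofs are below) =====
def Claim_equal_nw_init_correct : Prop := ∀ (seq1 : String) (seq2 : String) (scoring : List (String × Int)), Dom_nw_init_correct seq1 seq2 scoring → Pre_nw_init_correct seq1 seq2 scoring → Spec_nw_init_correct seq1 seq2 scoring (nw_init_correct seq1 seq2 scoring)

-- ===== LEMMAS AND PROOFS =====

-- the common value of both ports, row-major
def pvCanon (n m : Nat) (mm : Int) : List (List Int) :=
  ((PySem.List.pyRange 0 ((m : Int) + 1) 1).map (fun j => j * mm)) ::
  (PySem.List.pyRange 1 ((n : Int) + 1) 1).map (fun i => i * mm :: List.replicate m 0)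

-- enumerate of a constant list is a decorated range
theorem pv_enumerate_replicate {α : Type} (n : Nat) (s : Int) (x : α) :
    PySem.List.enumerate (List.replicate n x) s
      = (PySem.List.pyRange s (s + n) 1).map (fun j => (j, x)) := by
  induction n generalizing s with
  | zero => simp
  | succ n ih =>
    rw [List.replicate_succ, PySem.List.enumerate_cons, ih,
        PySem.List.pyRange_one_cons (by omega : s < s + ((n + 1 : Nat) : Int)), List.map_cons]
    have hc : s + 1 + (n : Int) = s + ((n + 1 : Nat) : Int) := by push_cast; ring
    rw [hc]

-- A's build-then-patch equals the canonical matrix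
theorem pv_A_core (n m : Nat) (mm : Int) :
    (PySem.List.enumerate
        ((((PySem.List.pyRange 0 ((n : Int) + 1) 1).map
              (fun _ => PySem.List.pyRepeat [(0 : Int)] ((m : Int) + 1))).set 0
            ((PySem.List.pyRange 0 ((m : Int) + 1) 1).map (fun i => i * mm))))).map
        (fun p => p.2.set 0 (p.1 * mm))
      = pvCanon n m mm := by
  have hrep : PySem.List.pyRepeat [(0 : Int)] ((m : Int) + 1) = List.replicate (m + 1) 0 := by
    rw [PySem.List.pyRepeat_singleton]; congr 1
  have hz : (PySem.List.pyRange 0 ((n : Int) + 1) 1).map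
        (fun _ => PySem.List.pyRepeat [(0 : Int)] ((m : Int) + 1))
      = List.replicate (n + 1) (List.replicate (m + 1) (0 : Int)) := by
    rw [hrep, List.map_const', PySem.List.length_pyRange_one]; congr 1
  rw [hz, List.replicate_succ, List.set_cons_zero, PySem.List.enumerate_cons,
      pv_enumerate_replicate, List.map_cons, List.map_map]
  unfold pvCanon
  congr 1
  · -- row 0: setting index 0 of first_row to 0*mm is the identity
    rw [PySem.List.pyRange_one_cons (by omega : (0 : Int) < (m : Int) + 1), List.map_cons,
        List.set_cons_zero]
  · have hr : (0 : Int) + 1 + (n : Int) = (n : Int) + 1 := by omega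
    rw [hr]
    apply List.map_congr_left
    intro i _
    simp [List.replicate_succ]

-- zip(*_) of one list of length r together with m zero-columns of length r
theorem pv_zip_tail (m : Nat) (xs : List Int) :
    pyZipStar (xs :: List.replicate m (List.replicate xs.length (0 : Int)))
      = xs.map (fun x => x :: List.replicate m (0 : Int)) := by
  induction xs with
  | nil =>
    rw [pyZipStar, dif_neg]
    · simp
    · simp
  | cons x xs ih =>
    rw [pyZipStar, dif_pos]
    · simp only [List.length_cons, List.replicate_succ (n := xs.length)]
      rw [List.map_cons, List.map_cons, List.map_replicate, List.map_replicate]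
      simp only [List.headI_cons, List.tail_cons]
      rw [ih, List.map_cons]
    · refine ⟨by simp, ?_⟩
      rw [List.all_eq_true]
      intro l hl
      rcases List.mem_cons.mp hl with h1 | h1
      · subst h1; simp
      · rw [List.eq_of_mem_replicate h1]
        simp [List.replicate_succ]

-- B's column-major build + transpose equals the canonical matrix
theorem pv_B_core (n m : Nat) (mm : Int) :
    pyZipStar
        ((PySem.List.pyRange 1 ((m : Int) + 1) 1).foldl
          (fun acc j => acc ++ [[j * mm] ++ PySem.List.pyRepeat [(0 : Int)] (n : Int)])
          [(PySem.List.pyRange 0 ((n : Int) + 1) 1).map (fun i => i * mm)])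
      = pvCanon n m mm := by
  rw [PySem.List.foldl_append_singleton_eq_map]
  have hrep : PySem.List.pyRepeat [(0 : Int)] (n : Int) = List.replicate n 0 := by
    rw [PySem.List.pyRepeat_singleton]; congr 1
  have hcols : (PySem.List.pyRange 1 ((m : Int) + 1) 1).map
        (fun j => [j * mm] ++ PySem.List.pyRepeat [(0 : Int)] (n : Int))
      = (PySem.List.pyRange 1 ((m : Int) + 1) 1).map
        (fun j => j * mm :: List.replicate n 0) := by
    apply List.map_congr_left; intro j _; rw [hrep]; rfl
  rw [hcols]
  have hcol0 : (PySem.List.pyRange 0 ((n : Int) + 1) 1).map (fun i => i * mm)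
      = (0 : Int) * mm :: (PySem.List.pyRange 1 ((n : Int) + 1) 1).map (fun i => i * mm) := by
    rw [PySem.List.pyRange_one_cons (by omega : (0 : Int) < (n : Int) + 1), List.map_cons]
    norm_num
  rw [hcol0, List.singleton_append]
  rw [pyZipStar, dif_pos]
  · -- heads give row 0, tails give the remaining rows
    have hheads : (((0 : Int) * mm :: (PySem.List.pyRange 1 ((n : Int) + 1) 1).map (fun i => i * mm)) ::
          (PySem.List.pyRange 1 ((m : Int) + 1) 1).map (fun j => j * mm :: List.replicate n 0)).map
          (fun l => l.headI)
        = (PySem.List.pyRange 0 ((m : Int) + 1) 1).map (fun j => j * mm) := by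
      rw [List.map_cons, List.map_map, List.headI_cons,
          PySem.List.pyRange_one_cons (by omega : (0 : Int) < (m : Int) + 1), List.map_cons]
      rfl
    have htails : (((0 : Int) * mm :: (PySem.List.pyRange 1 ((n : Int) + 1) 1).map (fun i => i * mm)) ::
          (PySem.List.pyRange 1 ((m : Int) + 1) 1).map (fun j => j * mm :: List.replicate n 0)).map
          (fun l => l.tail)
        = ((PySem.List.pyRange 1 ((n : Int) + 1) 1).map (fun i => i * mm)) ::
          List.replicate m (List.replicate n (0 : Int)) := by
      rw [List.map_cons, List.map_map, List.tail_cons]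
      congr 1
      rw [show ((fun l => l.tail) ∘ (fun (j : Int) => j * mm :: List.replicate n (0 : Int)))
            = (fun _ => List.replicate n (0 : Int)) from rfl,
          List.map_const', PySem.List.length_pyRange_one]
      congr 1
      omega
    rw [hheads, htails]
    have hlen : ((PySem.List.pyRange 1 ((n : Int) + 1) 1).map (fun i => i * mm)).length = n := by
      rw [List.length_map, PySem.List.length_pyRange_one]; omega
    have key := pv_zip_tail m ((PySem.List.pyRange 1 ((n : Int) + 1) 1).map (fun i => i * mm))
    rw [hlen] at key
    rw [key, List.map_map]
    unfold pvCanon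
    rfl
  · refine ⟨by simp, ?_⟩
    rw [List.all_eq_true]
    intro l hl
    rcases List.mem_cons.mp hl with h1 | h1
    · subst h1; simp
    · rcases List.mem_map.mp h1 with ⟨j, _, rfl⟩
      simp

-- ===== VERDICT (by name: the statement is the Claim_ definition above) =====
theorem nw_init_correct_spec : Claim_equal_nw_init_correct := by
  intro seq1 seq2 scoring _hdom _hpre
  unfold Spec_nw_init_correct nw_init_correct nw_init_correct_alt zero_init_correct
  simp only [PySem.Str.len_eq]
  rw [pv_A_core seq1.toList.length seq2.toList.length
        ((PySem.Dict.get? ⟨scoring⟩ "mismatch").getD (0 : Int)),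
      pv_B_core seq1.toList.length seq2.toList.length
        ((PySem.Dict.get? ⟨scoring⟩ "mismatch").getD (0 : Int))]
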